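-- pv_equiv track=rewrite | github.com/yuna1212/algorithm | 백준/구현/AC(2).py | compress_operations
-- ===== SOURCE A (Python) =====
-- def compress_operations(ops):
--     count_reversing = 0
--     count_pre_popping = 0
--     count_post_popping = 0
--     for p in ops:
--         if p == "R":
--             count_reversing += 1
--         else:
--             if count_reversing%2:
--                  # 홀수 -> 1번 뒤집기
--                 count_post_popping += 1
--             else:
--                 count_pre_popping += 1
--     return count_reversing, count_pre_popping, count_post_popping
-- ===== SOURCE B (Python) =====
-- def compress_operations(ops):
--     # Segment decomposition: collect the lengths of the runs of non-"R" elements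
--     # between "R"s, then sum segment lengths by index parity.
--     segs = []
--     cur = 0
--     for p in ops:
--         if p == "R":
--             segs.append(cur)
--             cur = 0
--         else:
--             cur += 1
--     segs.append(cur)
--     return len(segs) - 1, sum(segs[0::2]), sum(segs[1::2])
-- ===== Notes on version B (the rewrite author's own statement) =====
-- stated objective: alternative
-- what changed: B splits the op sequence into non-'R' run lengths (segments between 'R's) and derives the three counts from the segment list -- reverses = number of segments minus one, pre/post pops = sums of segments at even/odd indices -- instead of A's per-element loop with a running reverse-parity test.
import Mathlib
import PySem

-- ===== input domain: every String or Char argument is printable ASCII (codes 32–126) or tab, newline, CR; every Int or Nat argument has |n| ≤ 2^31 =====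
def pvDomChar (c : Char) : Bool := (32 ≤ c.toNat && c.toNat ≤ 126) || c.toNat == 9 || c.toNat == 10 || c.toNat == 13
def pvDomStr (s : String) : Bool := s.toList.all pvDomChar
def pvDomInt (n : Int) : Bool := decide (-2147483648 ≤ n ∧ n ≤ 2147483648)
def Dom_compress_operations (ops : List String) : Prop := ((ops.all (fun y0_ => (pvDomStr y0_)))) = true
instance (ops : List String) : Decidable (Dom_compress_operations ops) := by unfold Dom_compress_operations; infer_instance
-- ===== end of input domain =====

-- B replaces A's running reverse-parity per-element loop by collecting non-"R" run
-- lengths and summing them by index parity (alternative decomposition, same cost).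


-- ===== PORT A =====
-- A's for-loop over ops with three integer accumulators, branches in source order.
def compressALoop : List String → Int → Int → Int → Int × Int × Int
  | [], r, pre, post => (r, pre, post)
  | p :: rest, r, pre, post =>
    if p == "R" then compressALoop rest (r + 1) pre post
    else if PySem.Int.mod r 2 ≠ 0 then compressALoop rest r pre (post + 1)
    else compressALoop rest r (pre + 1) post

def compress_operations (ops : List String) : Int × Int × Int :=
  compressALoop ops 0 0 0

-- ===== PORT B =====
-- B's loop building the segment list (run lengths of non-"R" elements).
def compressBLoop : List String → List Int → Int → List Int
  | [], segs, cur => segs ++ [cur]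
  | p :: rest, segs, cur =>
    if p == "R" then compressBLoop rest (segs ++ [cur]) 0
    else compressBLoop rest segs (cur + 1)

-- hand port of the step-2 slice xs[0::2] (PySem.List.slice has no step); exact on lists.
def everyOther : List Int → List Int
  | [] => []
  | [x] => [x]
  | x :: _ :: rest => x :: everyOther rest

def compress_operations_alt (ops : List String) : Int × Int × Int :=
  let segs := compressBLoop ops [] 0
  (((segs.length : Int) - 1), (everyOther segs).sum, (everyOther (segs.drop 1)).sum)

-- ===== PRECONDITION & SPEC =====
def Spec_compress_operations (ops : List String) (out : Int × Int × Int) : Prop := out = compress_operations_alt ops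
instance (ops : List String) (out : Int × Int × Int) : Decidable (Spec_compress_operations ops out) := by unfold Spec_compress_operations; infer_instance

-- ===== CLAIM (what is proved, stated in full; the proofs are below) =====
def Claim_equal_compress_operations : Prop := ∀ (ops : List String), Dom_compress_operations ops → Spec_compress_operations ops (compress_operations ops)

-- ===== LEMMAS AND PROOFS =====

-- common recursive characterisation: counts assuming zero initial reverses;
-- a leading "R" swaps the pre/post roles of the rest.
def specCnt : List String → Int × Int × Int
  | [] => (0, 0, 0)
  | p :: rest =>
    let s := specCnt rest
    if p = "R" then (s.1 + 1, s.2.2, s.2.1) else (s.1, s.2.1 + 1, s.2.2)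

lemma pymod_two (r : Int) : PySem.Int.mod r 2 = r % 2 := by
  simp [PySem.Int.mod, Int.fmod_eq_emod]

lemma aLoop_spec : ∀ (ops : List String) (r pre post : Int),
    compressALoop ops r pre post =
      (r + (specCnt ops).1,
       pre + (if r % 2 = 0 then (specCnt ops).2.1 else (specCnt ops).2.2),
       post + (if r % 2 = 0 then (specCnt ops).2.2 else (specCnt ops).2.1)) := by
  intro ops
  induction ops with
  | nil => intro r pre post; simp [compressALoop, specCnt]
  | cons p rest ih =>
    intro r pre post
    by_cases hp : p = "R"
    · subst hp
      simp only [compressALoop, beq_self_eq_true, if_pos, ih, specCnt, pymod_two]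
      have h2 : (r + 1) % 2 = 0 ↔ ¬ (r % 2 = 0) := by omega
      by_cases h : r % 2 = 0 <;> simp [h, h2] <;> omega
    · have hb : (p == "R") = false := by simp [hp]
      simp only [compressALoop, hb, Bool.false_eq_true, ih, specCnt, pymod_two, if_neg hp]
      by_cases h : r % 2 = 0 <;> simp [h] <;> ring_nf

lemma bLoop_append : ∀ (ops : List String) (segs : List Int) (cur : Int),
    compressBLoop ops segs cur = segs ++ compressBLoop ops [] cur := by
  intro ops
  induction ops with
  | nil => intro segs cur; simp [compressBLoop]
  | cons p rest ih =>
    intro segs cur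
    by_cases hp : p = "R"
    · subst hp
      simp only [compressBLoop, beq_self_eq_true, if_pos]
      rw [List.nil_append, ih (segs ++ [cur]) 0, ih [cur] 0, List.append_assoc]
    · have hb : (p == "R") = false := by simp [hp]
      simp only [compressBLoop, hb, Bool.false_eq_true]
      exact ih segs (cur + 1)

lemma everyOther_cons (x : Int) (l : List Int) :
    everyOther (x :: l) = x :: everyOther l.tail := by
  cases l <;> rfl

lemma bLoop_spec : ∀ (ops : List String) (cur : Int),
    ((compressBLoop ops [] cur).length : Int) = (specCnt ops).1 + 1 ∧
    (everyOther (compressBLoop ops [] cur)).sum = cur + (specCnt ops).2.1 ∧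
    (everyOther ((compressBLoop ops [] cur).drop 1)).sum = (specCnt ops).2.2 := by
  intro ops
  induction ops with
  | nil => intro cur; simp [compressBLoop, everyOther, specCnt]
  | cons p rest ih =>
    intro cur
    by_cases hp : p = "R"
    · subst hp
      simp only [compressBLoop, beq_self_eq_true, if_pos, List.nil_append]
      rw [bLoop_append rest [cur] 0]
      obtain ⟨h1, h2, h3⟩ := ih 0
      refine ⟨?_, ?_, ?_⟩
      · simp [specCnt, h1]
      · rw [List.drop_one] at h3
        simp only [List.singleton_append, everyOther_cons, List.sum_cons]
        simp [specCnt, h3]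
      · simp [specCnt, h2]
    · have hb : (p == "R") = false := by simp [hp]
      simp only [compressBLoop, hb, Bool.false_eq_true]
      obtain ⟨h1, h2, h3⟩ := ih (cur + 1)
      refine ⟨?_, ?_, ?_⟩
      · simp [specCnt, hp, h1]
      · simp [specCnt, hp, h2]; ring
      · rw [List.drop_one] at h3; simp [specCnt, hp, h3]

-- ===== VERDICT (by name: the statement is the Claim_ definition above) =====
theorem compress_operations_spec : Claim_equal_compress_operations := by
  intro ops _
  unfold Spec_compress_operations compress_operations
  obtain ⟨h1, h2, h3⟩ := bLoop_spec ops 0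
  rw [aLoop_spec ops 0 0 0,
    show compress_operations_alt ops =
      (((compressBLoop ops [] 0).length : Int) - 1,
       (everyOther (compressBLoop ops [] 0)).sum,
       (everyOther ((compressBLoop ops [] 0).drop 1)).sum) from rfl,
    h1, h2, h3]
  simp
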